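-- pv_equiv track=rewrite | github.com/vutuanhai237/HCM-PredictPM2.5 | utilities.py | group_by_hours
-- ===== SOURCE A (Python) =====
-- def group_by_hours(y):
--     """Group test vector to clusters by 24 hours
--     """
--
--     y_hours = []
--     for i in range(0, 24):
--         temp = []
--         for j in range(i, len(y), 24):
--             temp.append(y[j])
--         y_hours.append(temp)
--     return y_hours
-- ===== SOURCE B (Python) =====
-- def group_by_hours(y):
--     """Group test vector to clusters by 24 hours
--     """
--     y_hours = [[] for _ in range(24)]
--     for j, v in enumerate(y):
--         y_hours[j % 24].append(v)
--     return y_hours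
-- ===== Notes on version B (the rewrite author's own statement) =====
-- stated objective: simpler
-- what changed: Replaces A's 24 strided sub-scans (one range(i, len(y), 24) index walk per hour) by a single index-ascending pass over enumerate(y) that distributes each element into one of 24 pre-allocated buckets via j % 24.
import Mathlib
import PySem

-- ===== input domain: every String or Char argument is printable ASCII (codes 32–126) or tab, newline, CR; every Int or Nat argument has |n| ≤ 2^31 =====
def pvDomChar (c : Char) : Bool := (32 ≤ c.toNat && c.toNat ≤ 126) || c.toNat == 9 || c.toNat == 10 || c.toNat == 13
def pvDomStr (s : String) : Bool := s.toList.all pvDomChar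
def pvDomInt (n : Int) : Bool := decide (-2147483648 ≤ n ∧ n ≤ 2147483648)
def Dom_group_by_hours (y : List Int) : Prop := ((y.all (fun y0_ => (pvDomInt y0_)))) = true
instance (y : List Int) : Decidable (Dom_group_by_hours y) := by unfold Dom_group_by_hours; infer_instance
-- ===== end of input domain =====

-- B replaces A's 24 strided sub-scans by a single index-ascending pass that drops each
-- element into bucket j % 24 of 24 pre-allocated buckets (same return value, no mutation of y).

-- ===== PORT A =====
-- literal port of A: for i in range(0,24): temp = []; for j in range(i, len(y), 24): temp.append(y[j]); y_hours.append(temp)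
-- (y[j] ported as pyGetD: every j produced by range(i, len(y), 24) is in range, so pyGetD is exact here)
def group_by_hours (y : List Int) : List (List Int) :=
  (PySem.List.pyRange 0 24 1).foldl
    (fun y_hours i =>
      y_hours ++ [(PySem.List.pyRange i (y.length : Int) 24).foldl
        (fun temp j => temp ++ [PySem.List.pyGetD y j 0]) []])
    []

-- ===== PORT B =====
-- literal port of B: y_hours = [[] for _ in range(24)]; for j, v in enumerate(y): y_hours[j % 24].append(v)
-- (y_hours[j % 24] index is always in range, so pyGetD/pySetD are exact here)
def group_by_hours_alt (y : List Int) : List (List Int) :=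
  (PySem.List.enumerate y).foldl
    (fun y_hours jv =>
      PySem.List.pySetD y_hours (PySem.Int.mod jv.1 24)
        (PySem.List.pyGetD y_hours (PySem.Int.mod jv.1 24) [] ++ [jv.2]))
    (List.replicate 24 [])

-- ===== PRECONDITION & SPEC =====
def Spec_group_by_hours (y : List Int) (out : List (List Int)) : Prop := out = group_by_hours_alt y
instance (y : List Int) (out : List (List Int)) : Decidable (Spec_group_by_hours y out) := by unfold Spec_group_by_hours; infer_instance

-- ===== CLAIM (what is proved, stated in full; the proofs are below) =====
def Claim_equal_group_by_hours : Prop := ∀ (y : List Int), Dom_group_by_hours y → Spec_group_by_hours y (group_by_hours y)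

-- ===== LEMMAS AND PROOFS =====

-- countdown stride: strideA s y = elements of y at positions s, s+24, s+48, ...
def strideA : Nat → List Int → List Int
  | _, [] => []
  | 0, a :: ys => a :: strideA 23 ys
  | Nat.succ t, _ :: ys => strideA t ys

-- range(s, n, 24) over Nat bounds, as a Nat-level closed form
theorem pyRange24_nat (s n : Nat) :
    PySem.List.pyRange (s : Int) (n : Int) 24
      = (List.range ((n - s + 23) / 24)).map (fun k => ((s + 24 * k : Nat) : Int)) := by
  rw [PySem.List.pyRange_of_pos _ _ (by norm_num : (0:Int) < 24)]
  have hif : (if (s : Int) < (n : Int) then (((n : Int) - (s : Int) + 24 - 1) / 24).toNat else 0)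
      = (n - s + 23) / 24 := by
    split_ifs with hlt <;> omega
  rw [hif]
  apply List.map_congr_left
  intro k _
  push_cast; ring

-- Nat-level core of A's inner loop: the strided index scan is the countdown stride
theorem stride_nat (y : List Int) : ∀ (s : Nat),
    (List.range ((y.length - s + 23) / 24)).map (fun k => y.getD (s + 24 * k) 0)
      = strideA s y := by
  induction y with
  | nil =>
      intro s
      simp [strideA]
  | cons a ys ih =>
      intro s
      cases s with
      | zero =>
          have hc : ((a :: ys).length - 0 + 23) / 24 = ys.length / 24 + 1 := by
            simp only [List.length_cons]; omega
          rw [hc, List.range_succ_eq_map, List.map_cons, List.map_map]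
          have htail :
              (List.range (ys.length / 24)).map ((fun k => (a :: ys).getD (0 + 24 * k) 0) ∘ Nat.succ)
                = (List.range ((ys.length - 23 + 23) / 24)).map (fun k => ys.getD (23 + 24 * k) 0) := by
            have hcnt : ys.length / 24 = (ys.length - 23 + 23) / 24 := by omega
            rw [← hcnt]
            apply List.map_congr_left
            intro k _
            show (a :: ys).getD (0 + 24 * (k + 1)) 0 = ys.getD (23 + 24 * k) 0
            have h1 : 0 + 24 * (k + 1) = (23 + 24 * k) + 1 := by ring
            rw [h1, List.getD_cons_succ]
          rw [htail, ih 23]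
          simp [strideA]
      | succ t =>
          have hc : ((a :: ys).length - (t + 1) + 23) / 24 = (ys.length - t + 23) / 24 := by
            simp only [List.length_cons]; omega
          have hs : strideA (t + 1) (a :: ys) = strideA t ys := rfl
          rw [hc, hs, ← ih t]
          apply List.map_congr_left
          intro k _
          show (a :: ys).getD (t + 1 + 24 * k) 0 = ys.getD (t + 24 * k) 0
          have h1 : t + 1 + 24 * k = (t + 24 * k) + 1 := by ring
          rw [h1, List.getD_cons_succ]

-- A's inner loop (as a map over the strided range) is the countdown stride
theorem inner_eq_stride (y : List Int) (s : Nat) :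
    (PySem.List.pyRange (s : Int) (y.length : Int) 24).map (fun j => PySem.List.pyGetD y j 0)
      = strideA s y := by
  rw [pyRange24_nat, List.map_map, ← stride_nat y s]
  apply List.map_congr_left
  intro k _
  show PySem.List.pyGetD y ((s + 24 * k : Nat) : Int) 0 = y.getD (s + 24 * k) 0
  rw [PySem.List.pyGetD_natCast]

-- getD after set (index in range)
theorem getD_set_24 (B : List (List Int)) (m i : Nat) (v : List Int) (hm : m < B.length) :
    (B.set m v).getD i [] = if i = m then v else B.getD i [] := by
  simp only [List.getD_eq_getElem?_getD, List.getElem?_set]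
  split_ifs with h1 h2 h3
  · rfl
  · omega
  · omega
  · rfl

-- a list of length 24 is the table of its own entries
theorem map_getD_self (B : List (List Int)) (hB : B.length = 24) :
    (List.range 24).map (fun i => B.getD i []) = B := by
  apply List.ext_getElem (by simp [hB])
  intro i h1 h2
  simp [List.getD_eq_getElem?_getD, List.getElem?_eq_getElem h2]

-- B's fold invariant: distributing the stream starting at absolute index p into 24 buckets
theorem foldB (y : List Int) : ∀ (p : Nat) (B : List (List Int)), B.length = 24 →
    (PySem.List.enumerate y (p : Int)).foldl
      (fun y_hours jv =>
        PySem.List.pySetD y_hours (PySem.Int.mod jv.1 24)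
          (PySem.List.pyGetD y_hours (PySem.Int.mod jv.1 24) [] ++ [jv.2])) B
      = (List.range 24).map (fun i => B.getD i [] ++ strideA ((i + 24 - p % 24) % 24) y) := by
  induction y with
  | nil =>
      intro p B hB
      have hs : ∀ c, strideA c ([] : List Int) = [] := fun c => by cases c <;> rfl
      simp only [PySem.List.enumerate_nil, List.foldl_nil, hs, List.append_nil]
      exact (map_getD_self B hB).symm
  | cons a ys ih =>
      intro p B hB
      simp only [PySem.List.enumerate_cons, List.foldl_cons]
      have hmod : PySem.Int.mod ((p : Nat) : Int) 24 = (((p % 24 : Nat)) : Int) := by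
        exact_mod_cast PySem.Int.mod_natCast p 24
      have hp1 : ((p : Int) + 1) = (((p + 1 : Nat)) : Int) := by push_cast; ring
      rw [hmod, hp1, PySem.List.pySetD_natCast, PySem.List.pyGetD_natCast]
      rw [ih (p + 1) _ (by simp [hB])]
      apply List.map_congr_left
      intro i hi
      have hi24 : i < 24 := List.mem_range.mp hi
      have hmlt : p % 24 < B.length := by rw [hB]; omega
      rw [getD_set_24 B (p % 24) i _ hmlt]
      by_cases h : i = p % 24
      · rw [if_pos h, ← h]
        have h0 : (i + 24 - i) % 24 = 0 := by omega
        have h23 : (i + 24 - (p + 1) % 24) % 24 = 23 := by omega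
        rw [h0, h23]
        show (B.getD i [] ++ [a]) ++ strideA 23 ys = B.getD i [] ++ strideA 0 (a :: ys)
        rw [List.append_assoc]
        rfl
      · rw [if_neg h]
        have hc : (i + 24 - p % 24) % 24 ≠ 0 := by omega
        obtain ⟨t, ht⟩ := Nat.exists_eq_succ_of_ne_zero hc
        have ht' : (i + 24 - (p + 1) % 24) % 24 = t := by omega
        rw [ht, ht']
        rfl

-- ===== VERDICT (by name: the statement is the Claim_ definition above) =====
theorem group_by_hours_spec : Claim_equal_group_by_hours := by
  intro y _
  show group_by_hours y = group_by_hours_alt y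
  unfold group_by_hours
  rw [PySem.List.foldl_append_singleton_eq_map, List.nil_append]
  have hA : PySem.List.pyRange 0 24 1 = (List.range 24).map (fun k => ((k : Nat) : Int)) := by decide
  rw [hA, List.map_map]
  unfold group_by_hours_alt
  have h0 : PySem.List.enumerate y = PySem.List.enumerate y (((0 : Nat) : Int)) := by norm_num
  rw [h0, foldB y 0 _ (by simp)]
  apply List.map_congr_left
  intro i hi
  have hi24 : i < 24 := List.mem_range.mp hi
  show (PySem.List.pyRange (i : Int) (y.length : Int) 24).foldl
        (fun temp j => temp ++ [PySem.List.pyGetD y j 0]) []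
      = (List.replicate 24 []).getD i [] ++ strideA ((i + 24 - 0 % 24) % 24) y
  rw [PySem.List.foldl_append_singleton_eq_map, List.nil_append, inner_eq_stride y i]
  have hrep : (List.replicate 24 ([] : List Int)).getD i [] = [] := by
    rw [List.getD_eq_getElem?_getD, List.getElem?_replicate, if_pos hi24]
    rfl
  have harith : (i + 24 - 0 % 24) % 24 = i := by omega
  rw [hrep, harith, List.nil_append]
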